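-- pv_equiv track=rewrite | github.com/LioB-FRNL/BOM-AI-Hackathon | teams/2_Pentabody/app/src/parser/parse_nkr_cijfers.py | _pick_default_filter_value
-- ===== SOURCE A (Python) =====
-- def _pick_default_filter_value(values: list[dict[str, str]]) -> str | None:
--     preferred_markers = [
--         "totaal/alle",
--         "totaal",
--         "alle",
--         "all",
--         "nvt",
--     ]
--     for marker in preferred_markers:
--         for value in values:
--             code = value["code"]
--             if marker in code:
--                 return code
--     return values[0]["code"] if values else None
-- ===== SOURCE B (Python) =====
-- def _pick_default_filter_value(values):
--     preferred_markers = [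
--         "totaal/alle",
--         "totaal",
--         "alle",
--         "all",
--         "nvt",
--     ]
--     n = len(preferred_markers)
--     best = None  # (rank, code) of the best value seen so far
--     for value in values:
--         code = value["code"]
--         rank = next((i for i, m in enumerate(preferred_markers) if m in code), n)
--         if rank == 0:
--             return code
--         if rank < n and (best is None or rank < best[0]):
--             best = (rank, code)
--     if best is not None:
--         return best[1]
--     return values[0]["code"] if values else None
-- ===== Notes on version B (the rewrite author's own statement) =====
-- stated objective: alternative
-- what changed: Replaced the marker-major nested loops (up to 5 full scans of values) by a single value-major pass that computes each code's priority rank once, returns immediately on a rank-0 hit, and otherwise keeps the lowest-rank earliest match.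
import Mathlib
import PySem

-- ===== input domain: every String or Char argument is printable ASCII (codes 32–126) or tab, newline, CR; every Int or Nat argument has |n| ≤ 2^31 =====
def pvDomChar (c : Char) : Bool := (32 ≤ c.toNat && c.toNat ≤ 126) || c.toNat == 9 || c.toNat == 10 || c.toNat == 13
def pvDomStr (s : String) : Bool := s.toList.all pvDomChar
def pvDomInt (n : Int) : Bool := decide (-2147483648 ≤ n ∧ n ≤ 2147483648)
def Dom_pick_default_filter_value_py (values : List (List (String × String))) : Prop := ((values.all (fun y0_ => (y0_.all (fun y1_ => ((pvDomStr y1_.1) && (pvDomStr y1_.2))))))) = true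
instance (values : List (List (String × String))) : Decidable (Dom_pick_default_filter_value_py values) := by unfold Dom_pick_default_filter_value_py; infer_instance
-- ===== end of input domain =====

-- B replaces A's marker-major nested loops by one value-major pass keeping the best
-- (lowest-priority-rank, earliest) match; return values proved equal, no speed claimed.

-- ===== PORT A =====
-- value["code"]; a missing "code" key is a Python KeyError, excluded by Pre_ (getD "" is never the result there)
def pvACode (v : List (String × String)) : String :=
  (PySem.Dict.mk v).getD "code" ""

-- inner loop: 'for value in values: … if marker in code: return code'
def pvAScan (marker : String) : List (List (String × String)) → Option String
  | [] => none
  | v :: vs =>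
    let code := pvACode v
    if PySem.Str.isIn marker code then some code else pvAScan marker vs

-- outer loop over the markers, then the final 'values[0]["code"] if values else None'
def pvAOuter (markers : List String) (values : List (List (String × String))) : Option String :=
  match markers with
  | [] =>
    match values with
    | [] => none
    | v :: _ => some (pvACode v)
  | m :: ms =>
    match pvAScan m values with
    | some c => some c
    | none => pvAOuter ms values

def pick_default_filter_value_py (values : List (List (String × String))) : Option String :=
  let preferred_markers := ["totaal/alle", "totaal", "alle", "all", "nvt"]
  pvAOuter preferred_markers values

-- ===== PORT B =====
-- value["code"]; a missing "code" key is a Python KeyError, excluded by Pre_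
def pvBCode (v : List (String × String)) : String :=
  (PySem.Dict.mk v).getD "code" ""

-- rank = next((i for i, m in enumerate(preferred_markers) if m in code), len(preferred_markers))
def pvBRank : List String → String → Nat
  | [], _ => 0
  | m :: ms, code => if PySem.Str.isIn m code then 0 else pvBRank ms code + 1

-- 'best is None or rank < best[0]'
def pvBetter (r : Nat) (best : Option (Nat × String)) : Bool :=
  match best with
  | none => true
  | some p => decide (r < p.1)

-- after the loop: 'return best[1] if best else (values[0]["code"] if values else None)'
def pvBFinal (best : Option (Nat × String)) (orig : List (List (String × String))) : Option String :=
  match best with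
  | some p => some p.2
  | none =>
    match orig with
    | [] => none
    | v :: _ => some (pvBCode v)

-- the single value-major pass with early return on a rank-0 hit
def pvBLoop (ms : List String) (orig : List (List (String × String))) :
    List (List (String × String)) → Option (Nat × String) → Option String
  | [], best => pvBFinal best orig
  | v :: vs, best =>
    let code := pvBCode v
    let r := pvBRank ms code
    if r = 0 then some code
    else if decide (r < ms.length) && pvBetter r best then pvBLoop ms orig vs (some (r, code))
    else pvBLoop ms orig vs best

def pick_default_filter_value_py_alt (values : List (List (String × String))) : Option String :=
  let preferred_markers := ["totaal/alle", "totaal", "alle", "all", "nvt"]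
  pvBLoop preferred_markers values values none

-- ===== PRECONDITION & SPEC =====
-- first-match "code" lookup, "" when absent (used only to STATE Pre_, not by the ports)
def pvPreCode (v : List (String × String)) : String :=
  ((v.find? (fun p => p.1 == "code")).map Prod.snd).getD ""

-- Pre_ excludes exactly the inputs on which Python A raises KeyError: some dict without a
-- "code" key that is not preceded by a dict whose code contains the first marker
-- "totaal/alle" (with such a predecessor both A and B return early, before the bad dict).
def Pre_pick_default_filter_value_py (values : List (List (String × String))) : Prop :=
  ∀ i < values.length, "code" ∉ (values.getD i []).map Prod.fst →
    ∃ v ∈ values.take i, PySem.Str.isIn "totaal/alle" (pvPreCode v) = true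
instance (values : List (List (String × String))) : Decidable (Pre_pick_default_filter_value_py values) := by unfold Pre_pick_default_filter_value_py; infer_instance

def pvWitness_pick_default_filter_value_py : (List (List (String × String))) :=
  [[("code", "alle jaren")], [("code", "totaal")]]

def Spec_pick_default_filter_value_py (values : List (List (String × String))) (out : Option String) : Prop := out = pick_default_filter_value_py_alt values
instance (values : List (List (String × String))) (out : Option String) : Decidable (Spec_pick_default_filter_value_py values out) := by unfold Spec_pick_default_filter_value_py; infer_instance

-- ===== CLAIM (what is proved, stated in full; the proofs are below) =====
def Claim_equal_pick_default_filter_value_py : Prop := ∀ (values : List (List (String × String))), Dom_pick_default_filter_value_py values → Pre_pick_default_filter_value_py values → Spec_pick_default_filter_value_py values (pick_default_filter_value_py values)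

-- ===== LEMMAS AND PROOFS =====

-- unfolding lemmas for the recursive ports
theorem pvAScan_cons (m : String) (v : List (String × String)) (vs : List (List (String × String))) :
    pvAScan m (v :: vs) =
      if PySem.Str.isIn m (pvACode v) = true then some (pvACode v) else pvAScan m vs := rfl

theorem pvBLoop_cons (ms : List String) (orig : List (List (String × String)))
    (v : List (String × String)) (vs : List (List (String × String))) (best : Option (Nat × String)) :
    pvBLoop ms orig (v :: vs) best =
      if pvBRank ms (pvBCode v) = 0 then some (pvBCode v)
      else if decide (pvBRank ms (pvBCode v) < ms.length) && pvBetter (pvBRank ms (pvBCode v)) best then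
        pvBLoop ms orig vs (some (pvBRank ms (pvBCode v), pvBCode v))
      else pvBLoop ms orig vs best := rfl

-- proof-side fold step: what one iteration of B's loop does to the accumulator
def pvStep (ms : List String) (best : Option (Nat × String)) (v : List (String × String)) :
    Option (Nat × String) :=
  if decide (pvBRank ms (pvBCode v) < ms.length) && pvBetter (pvBRank ms (pvBCode v)) best then
    some (pvBRank ms (pvBCode v), pvBCode v)
  else best

-- accumulator invariant: once best has rank 0 it can never change
theorem pvStep_rank_zero (ms : List String) (c : String) (v : List (String × String)) :
    pvStep ms (some (0, c)) v = some (0, c) := by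
  simp [pvStep, pvBetter]

theorem foldl_pvStep_rank_zero (ms : List String) (c : String)
    (vs : List (List (String × String))) :
    vs.foldl (pvStep ms) (some (0, c)) = some (0, c) := by
  induction vs with
  | nil => rfl
  | cons v vs ih => simp [List.foldl_cons, pvStep_rank_zero, ih]

-- invariant predicate on the accumulator: empty or of rank ≥ 1
def pvPos (best : Option (Nat × String)) : Prop := ∀ p, best = some p → 1 ≤ p.1

-- empty marker list: the step does nothing
theorem pvStep_nil (best : Option (Nat × String)) (v : List (String × String)) :
    pvStep [] best v = best := by
  simp [pvStep]

theorem foldl_pvStep_nil (vs : List (List (String × String))) (best : Option (Nat × String)) :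
    vs.foldl (pvStep []) best = best := by
  induction vs generalizing best with
  | nil => rfl
  | cons v vs ih => rw [List.foldl_cons, pvStep_nil, ih]

theorem pvBRank_cons_pos (m : String) (ms : List String) (code : String)
    (h : PySem.Str.isIn m code = false) :
    pvBRank (m :: ms) code = pvBRank ms code + 1 := by
  simp only [pvBRank]
  rw [h]
  simp

theorem pvBRank_cons_zero (m : String) (ms : List String) (code : String)
    (h : PySem.Str.isIn m code = true) :
    pvBRank (m :: ms) code = 0 := by
  simp only [pvBRank]
  rw [h]
  simp

theorem pvBetter_zero (best : Option (Nat × String)) (hb : pvPos best) :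
    pvBetter 0 best = true := by
  cases best with
  | none => rfl
  | some p =>
    have := hb p rfl
    simp [pvBetter]
    omega

theorem pvACode_eq_pvBCode (v : List (String × String)) : pvACode v = pvBCode v := rfl

-- L1: if A's scan for the head marker succeeds with c, the fold ends at (0, c)
theorem foldl_pvStep_of_scan_some (m : String) (ms : List String) (c : String) :
    ∀ (vs : List (List (String × String))) (best : Option (Nat × String)),
      pvPos best → pvAScan m vs = some c →
      vs.foldl (pvStep (m :: ms)) best = some (0, c)
  | [], best => by intro _ h; simp [pvAScan] at h
  | v :: vs, best => by
    intro hb h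
    rw [pvAScan_cons] at h
    by_cases hin : PySem.Str.isIn m (pvACode v) = true
    · rw [if_pos hin] at h
      have hc : c = pvACode v := (Option.some_inj.mp h).symm
      have hr : pvBRank (m :: ms) (pvBCode v) = 0 :=
        pvBRank_cons_zero m ms _ (by rw [← pvACode_eq_pvBCode]; exact hin)
      have hstep : pvStep (m :: ms) best v = some (0, pvBCode v) := by
        unfold pvStep
        rw [hr, pvBetter_zero best hb]
        simp
      rw [List.foldl_cons, hstep, foldl_pvStep_rank_zero, hc, pvACode_eq_pvBCode]
    · have hin' : PySem.Str.isIn m (pvACode v) = false := by simpa using hin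
      rw [if_neg (by rw [hin']; simp)] at h
      have hr : pvBRank (m :: ms) (pvBCode v) = pvBRank ms (pvBCode v) + 1 :=
        pvBRank_cons_pos m ms _ (by rw [← pvACode_eq_pvBCode]; exact hin')
      have hb' : pvPos (pvStep (m :: ms) best v) := by
        unfold pvStep
        split
        · intro p hp
          injection hp with hp'
          rw [← hp', hr]
          omega
        · exact hb
      rw [List.foldl_cons]
      exact foldl_pvStep_of_scan_some m ms c vs _ hb' h

-- scan failure means no value's code contains the marker
theorem scan_none_forall (m : String) :
    ∀ (vs : List (List (String × String))), pvAScan m vs = none →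
      ∀ v ∈ vs, PySem.Str.isIn m (pvACode v) = false
  | [], _ => by intro v hv; cases hv
  | v :: vs, h => by
    intro w hw
    rw [pvAScan_cons] at h
    by_cases hin : PySem.Str.isIn m (pvACode v) = true
    · rw [if_pos hin] at h; cases h
    · have hin' : PySem.Str.isIn m (pvACode v) = false := by simpa using hin
      rw [if_neg (by rw [hin']; simp)] at h
      cases hw with
      | head => exact hin'
      | tail _ hw' => exact scan_none_forall m vs h w hw'

-- rank shift: (r, c) ↦ (r+1, c)
def pvShift (best : Option (Nat × String)) : Option (Nat × String) :=
  best.map (fun p => (p.1 + 1, p.2))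

theorem pvBetter_shift (r : Nat) (best : Option (Nat × String)) :
    pvBetter (r + 1) (pvShift best) = pvBetter r best := by
  cases best with
  | none => rfl
  | some p => simp [pvBetter, pvShift]

-- L2: when no code contains m, a fold over (m :: ms) is the shifted fold over ms
theorem foldl_pvStep_shift (m : String) (ms : List String) :
    ∀ (vs : List (List (String × String))) (best : Option (Nat × String)),
      (∀ v ∈ vs, PySem.Str.isIn m (pvACode v) = false) →
      vs.foldl (pvStep (m :: ms)) (pvShift best) = pvShift (vs.foldl (pvStep ms) best)
  | [], best => by intro _; rfl
  | v :: vs, best => by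
    intro hfree
    have hin : PySem.Str.isIn m (pvACode v) = false := hfree v (List.mem_cons_self ..)
    have hr : pvBRank (m :: ms) (pvBCode v) = pvBRank ms (pvBCode v) + 1 :=
      pvBRank_cons_pos m ms _ (by rw [← pvACode_eq_pvBCode]; exact hin)
    have hstep : pvStep (m :: ms) (pvShift best) v = pvShift (pvStep ms best v) := by
      unfold pvStep
      rw [hr, pvBetter_shift]
      have hlen : (decide (pvBRank ms (pvBCode v) + 1 < (m :: ms).length) : Bool)
          = decide (pvBRank ms (pvBCode v) < ms.length) := by
        simp
      rw [hlen]
      by_cases hc : (decide (pvBRank ms (pvBCode v) < ms.length) && pvBetter (pvBRank ms (pvBCode v)) best) = true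
      · rw [if_pos hc, if_pos hc]; rfl
      · rw [if_neg hc, if_neg hc]
    rw [List.foldl_cons, List.foldl_cons, hstep]
    exact foldl_pvStep_shift m ms vs _ (fun w hw => hfree w (List.mem_cons_of_mem _ hw))

theorem pvShift_none : pvShift none = none := rfl

theorem pvBFinal_shift (best : Option (Nat × String)) (orig : List (List (String × String))) :
    pvBFinal (pvShift best) orig = pvBFinal best orig := by
  cases best with
  | none => rfl
  | some p => rfl

-- A characterized as the fold
theorem pvAOuter_eq_fold (ms : List String) (vs : List (List (String × String))) :
    pvAOuter ms vs = pvBFinal (vs.foldl (pvStep ms) none) vs := by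
  induction ms with
  | nil =>
    rw [foldl_pvStep_nil]
    cases vs with
    | nil => rfl
    | cons v vs' => rfl
  | cons m ms ih =>
    cases h : pvAScan m vs with
    | some c =>
      have hf := foldl_pvStep_of_scan_some m ms c vs none (by intro p hp; cases hp) h
      rw [hf]
      simp [pvAOuter, h, pvBFinal]
    | none =>
      have hfree := scan_none_forall m vs h
      have hsh : vs.foldl (pvStep (m :: ms)) (pvShift none) = pvShift (vs.foldl (pvStep ms) none) :=
        foldl_pvStep_shift m ms vs none hfree
      rw [pvShift_none] at hsh
      rw [hsh, pvBFinal_shift]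
      simp only [pvAOuter, h]
      exact ih

-- B's loop (with early return) computes the same fold
theorem pvBLoop_eq_fold (ms : List String) (hms : ms ≠ [])
    (orig : List (List (String × String))) :
    ∀ (vs : List (List (String × String))) (best : Option (Nat × String)),
      pvPos best → pvBLoop ms orig vs best = pvBFinal (vs.foldl (pvStep ms) best) orig
  | [], best => by intro _; rfl
  | v :: vs, best => by
    intro hb
    rw [pvBLoop_cons, List.foldl_cons]
    by_cases hr : pvBRank ms (pvBCode v) = 0
    · have hlen : 0 < ms.length := List.length_pos_iff.mpr hms
      have hstep : pvStep ms best v = some (0, pvBCode v) := by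
        unfold pvStep
        rw [hr, pvBetter_zero best hb]
        simp [hlen]
      rw [if_pos hr, hstep, foldl_pvStep_rank_zero]
      rfl
    · rw [if_neg hr]
      by_cases hc : (decide (pvBRank ms (pvBCode v) < ms.length) && pvBetter (pvBRank ms (pvBCode v)) best) = true
      · have hstep : pvStep ms best v = some (pvBRank ms (pvBCode v), pvBCode v) := by
          unfold pvStep; rw [if_pos hc]
        rw [if_pos hc, hstep]
        exact pvBLoop_eq_fold ms hms orig vs _
          (by intro p hp; injection hp with hp'; rw [← hp']; simpa using Nat.one_le_iff_ne_zero.mpr hr)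
      · have hstep : pvStep ms best v = best := by
          unfold pvStep; rw [if_neg hc]
        rw [if_neg hc, hstep]
        exact pvBLoop_eq_fold ms hms orig vs best hb

-- ===== VERDICT (by name: the statement is the Claim_ definition above) =====
theorem pick_default_filter_value_py_spec : Claim_equal_pick_default_filter_value_py := by
  intro values _ _
  unfold Spec_pick_default_filter_value_py pick_default_filter_value_py pick_default_filter_value_py_alt
  rw [pvBLoop_eq_fold _ (by decide) values values none (by intro p hp; cases hp)]
  exact pvAOuter_eq_fold _ values
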